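-- pv_equiv track=rewrite | github.com/pelekoudasq/core | utils/gamma_encoding.py | _get_offsets
-- ===== SOURCE A (Python) =====
-- _terms = {}
--
-- def _get_term(n, k):
--     """
--     :type n:
--     :type k:
--     :rtype: int
--     """
--     if k >= n:
--         return 1
--
--     try:
--         t = _terms[n]
--     except KeyError:
--         t = {n: 1}
--         _terms[n] = t
--     else:
--         if k in t:
--             return t[k]
--
--     m = k
--     while 1:
--         m += 1
--         if m in t:
--             break
--
--     term = t[m]
--     while 1:
--         term *= m
--         m -= 1
--         t[m] = term
--         if m <= k:
--             break
--
--     return term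
--
-- _offsets = {}
--
-- def _get_offsets(n):
--     """
--     :type n: int
--     :rtype: list[int]
--     """
--     if n in _offsets:
--         return _offsets[n]
--
--     offsets = []
--     append = offsets.append
--     sumus = 0
--     i = 0
--     while 1:
--         sumus += _get_term(n, n - i)
--         append(sumus)
--         if i == n:
--             break
--         i += 1
--
--     _offsets[n] = offsets
--     return offsets
-- ===== SOURCE B (Python) =====
-- def _get_offsets(n):
--     """
--     :type n: int
--     :rtype: list[int]
--     """
--     offsets = []
--     sumus = 0
--     term = 1
--     for i in range(n + 1):
--         sumus += term
--         offsets.append(sumus)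
--         term *= n - i
--     return offsets
-- ===== Notes on version B (the rewrite author's own statement) =====
-- stated objective: simpler
-- what changed: B replaces the memoized _get_term helper (global table, key-search loop, downward multiplication loop) and the while-True accumulator by a single for-loop over range(n+1) that maintains the falling-factorial term as a running product.
import Mathlib
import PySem

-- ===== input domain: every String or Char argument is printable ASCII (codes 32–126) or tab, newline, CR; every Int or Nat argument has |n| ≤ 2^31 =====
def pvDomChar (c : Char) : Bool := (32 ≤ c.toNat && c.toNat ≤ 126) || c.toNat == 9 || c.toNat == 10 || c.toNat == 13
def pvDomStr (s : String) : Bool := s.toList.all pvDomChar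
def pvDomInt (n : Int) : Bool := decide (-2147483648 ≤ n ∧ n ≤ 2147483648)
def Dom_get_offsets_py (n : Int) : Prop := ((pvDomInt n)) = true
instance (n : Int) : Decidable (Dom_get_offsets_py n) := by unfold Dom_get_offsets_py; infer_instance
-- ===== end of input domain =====

-- B replaces A's memoized _get_term helper and while-True loop by one for-loop with a running
-- falling-factorial product (objective: simpler). Equivalence is about the RETURN value only:
-- A also fills the module-level caches _terms/_offsets, a global side effect a pure port cannot
-- carry; the caches never change the returned values, and the ports below are the cache-free
-- per-call computation (the fresh t = {n: 1} of a cold _terms entry).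

-- ===== PORT A =====
-- Python: m = k; while 1: m += 1; if m in t: break   (t is the dict built in _get_term)
-- fuel = number of remaining possible increments; never exhausted on inputs in Pre_
def pvSearchLoop (t : PySem.Dict Int Int) (m : Int) : Nat → Int
  | 0 => m
  | fuel + 1 =>
    let m := m + 1
    if t.contains m then m else pvSearchLoop t m fuel

-- Python: while 1: term *= m; m -= 1; t[m] = term; if m <= k: break
def pvTermLoop (t : PySem.Dict Int Int) (k term m : Int) : Nat → Int
  | 0 => term
  | fuel + 1 =>
    let term := term * m
    let m := m - 1
    let t := t.insert m term
    if m ≤ k then term else pvTermLoop t k term m fuel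

-- _get_term(n, k) on a cold cache: t = {n: 1} is fresh, so 'try/except KeyError' takes the
-- except branch and builds t; t[m] after the search is present on all inputs in Pre_.
def pvGetTerm (n k : Int) : Int :=
  if k ≥ n then 1
  else
    let t : PySem.Dict Int Int := PySem.Dict.mk [(n, 1)]
    let m := pvSearchLoop t k (n - k).toNat
    let term := (t.get? m).getD 0   -- Python t[m]
    pvTermLoop t k term m (n - k).toNat

-- Python: sumus = 0; i = 0; while 1: sumus += _get_term(n, n-i); append(sumus); if i == n: break; i += 1
-- fuel is exhausted only when the Python loop can never reach i == n (n < 0, where Python diverges;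
-- excluded by Pre_).
def pvOffLoop (n : Int) (i sumus : Int) (acc : List Int) : Nat → List Int
  | 0 => acc
  | fuel + 1 =>
    let sumus := sumus + pvGetTerm n (n - i)
    let acc := acc ++ [sumus]
    if i == n then acc else pvOffLoop n (i + 1) sumus acc fuel

def get_offsets_py (n : Int) : List Int :=
  pvOffLoop n 0 0 [] (n.toNat + 1)

-- ===== PORT B =====
def get_offsets_py_alt (n : Int) : List Int :=
  ((PySem.List.pyRange 0 (n + 1) 1).foldl
    (fun st i =>
      let sumus := st.1 + st.2.1
      (sumus, st.2.1 * (n - i), st.2.2 ++ [sumus]))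
    ((0 : Int), (1 : Int), ([] : List Int))).2.2

-- ===== PRECONDITION & SPEC =====
-- Pre_ excludes negative n, where the Python A never terminates (its while loop can only break at
-- i == n and i only counts upward from its initial value).
def Pre_get_offsets_py (n : Int) : Prop := 0 ≤ n
instance (n : Int) : Decidable (Pre_get_offsets_py n) := by unfold Pre_get_offsets_py; infer_instance
def pvWitness_get_offsets_py : Int := 5

def Spec_get_offsets_py (n : Int) (out : List Int) : Prop := out = get_offsets_py_alt n
instance (n : Int) (out : List Int) : Decidable (Spec_get_offsets_py n out) := by unfold Spec_get_offsets_py; infer_instance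

-- ===== CLAIM (what is proved, stated in full; the proofs are below) =====
def Claim_equal_get_offsets_py : Prop := ∀ (n : Int), Dom_get_offsets_py n → Pre_get_offsets_py n → Spec_get_offsets_py n (get_offsets_py n)

-- ===== LEMMAS AND PROOFS =====

-- one-step unfoldings (keep `simp only` from unrolling a loop twice)
theorem pvSearchLoop_succ (t : PySem.Dict Int Int) (m : Int) (f : Nat) :
    pvSearchLoop t m (f + 1) = (if t.contains (m + 1) then m + 1 else pvSearchLoop t (m + 1) f) := rfl

theorem pvTermLoop_succ (t : PySem.Dict Int Int) (k term m : Int) (f : Nat) :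
    pvTermLoop t k term m (f + 1) =
      (if m - 1 ≤ k then term * m else pvTermLoop (t.insert (m - 1) (term * m)) k (term * m) (m - 1) f) := rfl

theorem pvOffLoop_succ (n i sumus : Int) (acc : List Int) (f : Nat) :
    pvOffLoop n i sumus acc (f + 1) =
      (if i == n then acc ++ [sumus + pvGetTerm n (n - i)]
       else pvOffLoop n (i + 1) (sumus + pvGetTerm n (n - i)) (acc ++ [sumus + pvGetTerm n (n - i)]) f) := rfl

-- B's running product: pvFF n i = n * (n-1) * … * (n-i+1)
def pvFF (n : Int) : Nat → Int
  | 0 => 1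
  | i + 1 => pvFF n i * (n - i)

theorem pvFF_succ_top (n : Int) (d : Nat) : pvFF n (d + 1) = n * pvFF (n - 1) d := by
  induction d generalizing n with
  | zero => simp [pvFF]
  | succ d ih =>
    have h1 : pvFF n (d + 1 + 1) = pvFF n (d + 1) * (n - (d + 1)) := rfl
    have h2 : pvFF (n - 1) (d + 1) = pvFF (n - 1) d * ((n - 1) - d) := rfl
    rw [h1, ih n, h2]
    ring

theorem pvSearchLoop_eq (n : Int) :
    ∀ (f : Nat) (m : Int), m + f = n → 1 ≤ f → pvSearchLoop (PySem.Dict.mk [(n, 1)]) m f = n := by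
  intro f
  induction f with
  | zero => intro m _ h; omega
  | succ f ih =>
    intro m hm _
    rw [pvSearchLoop_succ]
    have hcont : (PySem.Dict.mk [(n, (1 : Int))]).contains (m + 1) = (m + 1 == n) := by
      simp [PySem.Dict.contains_mk, eq_comm]
    rw [hcont]
    by_cases h : m + 1 = n
    · simp [h]
    · rw [show (m + 1 == n) = false by simp [h]]
      simp only [Bool.false_eq_true, if_false]
      exact ih (m + 1) (by omega) (by omega)

theorem pvTermLoop_eq (k : Int) :
    ∀ (d : Nat) (m : Int), m = k + 1 + d →
      ∀ (t : PySem.Dict Int Int) (term : Int), pvTermLoop t k term m (d + 1) = term * pvFF m (d + 1) := by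
  intro d
  induction d with
  | zero =>
    intro m hm t term
    rw [pvTermLoop_succ, if_pos (by omega)]
    simp [pvFF]
  | succ d ih =>
    intro m hm t term
    rw [show d + 1 + 1 = (d + 1) + 1 from rfl, pvTermLoop_succ, if_neg (by push_cast at hm ⊢; omega)]
    rw [ih (m - 1) (by push_cast at hm ⊢; omega)]
    rw [pvFF_succ_top m (d + 1)]
    ring

-- A's term for index i (cold cache) is the falling factorial pvFF n i
theorem pvGetTerm_eq (n : Int) (i : Nat) (hi : (i : Int) ≤ n) :
    pvGetTerm n (n - i) = pvFF n i := by
  cases i with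
  | zero => simp [pvGetTerm, pvFF]
  | succ i =>
    have hk : ¬ (n - (i + 1 : Nat) ≥ n) := by push_cast; omega
    simp only [pvGetTerm, if_neg hk]
    have hfuel : (n - (n - (i + 1 : Nat))).toNat = i + 1 := by push_cast at hi ⊢; omega
    rw [hfuel]
    rw [pvSearchLoop_eq n (i + 1) (n - (i + 1 : Nat)) (by push_cast; ring) (by omega)]
    have hget : ((PySem.Dict.mk [(n, (1 : Int))]).get? n).getD 0 = 1 := by
      simp [PySem.Dict.get?_mk_cons]
    rw [hget]
    rw [pvTermLoop_eq (n - (i + 1 : Nat)) i n (by push_cast; ring)]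
    simp

-- Main loop correspondence: A's while-loop from index i equals B's fold over range(i, n+1)
theorem pvLoop_eq (n : Int) :
    ∀ (d : Nat) (i : Nat) (s : Int) (acc : List Int),
      (i : Int) ≤ n → d = (n - i).toNat →
      pvOffLoop n i s acc (d + 1) =
        ((PySem.List.pyRange i (n + 1) 1).foldl
          (fun st j =>
            let sumus := st.1 + st.2.1
            (sumus, st.2.1 * (n - j), st.2.2 ++ [sumus]))
          (s, pvFF n i, acc)).2.2 := by
  intro d
  induction d with
  | zero =>
    intro i s acc hi hd
    have hin : (i : Int) = n := by omega
    rw [pvOffLoop_succ, pvGetTerm_eq n i hi]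
    rw [show ((i : Int) == n) = true by simpa using hin]
    rw [PySem.List.pyRange_one_cons (by omega), PySem.List.pyRange_one_eq_nil (by omega)]
    simp
  | succ d ih =>
    intro i s acc hi hd
    have hlt : (i : Int) < n := by omega
    rw [pvOffLoop_succ, pvGetTerm_eq n i hi]
    rw [show ((i : Int) == n) = false by simp; omega]
    simp only [Bool.false_eq_true, if_false]
    rw [PySem.List.pyRange_one_cons (by omega), List.foldl_cons]
    have hih := ih (i + 1) (s + pvFF n i) (acc ++ [s + pvFF n i]) (by push_cast; omega) (by push_cast at hd ⊢; omega)
    rw [show ((i + 1 : Nat) : Int) = (i : Int) + 1 by push_cast; ring] at hih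
    rw [hih]
    rfl

-- ===== VERDICT (by name: the statement is the Claim_ definition above) =====
theorem get_offsets_py_spec : Claim_equal_get_offsets_py := by
  intro n _ hpre
  show get_offsets_py n = get_offsets_py_alt n
  unfold get_offsets_py get_offsets_py_alt
  have h := pvLoop_eq n (n - ((0 : Nat) : Int)).toNat 0 0 [] (by exact_mod_cast hpre) rfl
  simp only [Nat.cast_zero, sub_zero, pvFF] at h
  rw [show n.toNat + 1 = (n).toNat + 1 from rfl, show (n).toNat = (n - 0).toNat by omega] at *
  simpa using h
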